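-- pv_equiv track=rewrite | github.com/davemuscle/sigma_delta_converters | model/SigmaDeltaAdc.py | cic_compensator
-- ===== SOURCE A (Python) =====
-- def cic_compensator(samples, order):
--     if(order == 1):
--         A = -18
--     if(order == 2 or order == 3):
--         A = -10
--     if(order == 4 or order == 5):
--         A = -6
--     if(order >= 6):
--         A = -4
--     d1 = 0
--     d2 = 0
--     d = []
--     for x in samples:
--         d.append(d2 + x + A*d1)
--         d2 = d1
--         d1 = x
--     return d
-- ===== SOURCE B (Python) =====
-- def cic_compensator(samples, order):
--     # coefficient table lookup (order >= 6 and anything else default to -4)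
--     A = {1: -18, 2: -10, 3: -10, 4: -6, 5: -6}.get(order, -4)
--     s = list(samples)
--     # superposition of three streams: s, A*s delayed by one, s delayed by two
--     delayed1 = [0] + [A * v for v in s]
--     delayed2 = [0, 0] + s
--     return [a + b + c for a, b, c in zip(s, delayed1, delayed2)]
-- ===== Notes on version B (the rewrite author's own statement) =====
-- stated objective: alternative
-- what changed: B computes the filter as a superposition of three zero-padded streams (s, A*s delayed by one, s delayed by two) added elementwise with zip, with the coefficient drawn from a dict table instead of an if ladder and no running register state.
import Mathlib
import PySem

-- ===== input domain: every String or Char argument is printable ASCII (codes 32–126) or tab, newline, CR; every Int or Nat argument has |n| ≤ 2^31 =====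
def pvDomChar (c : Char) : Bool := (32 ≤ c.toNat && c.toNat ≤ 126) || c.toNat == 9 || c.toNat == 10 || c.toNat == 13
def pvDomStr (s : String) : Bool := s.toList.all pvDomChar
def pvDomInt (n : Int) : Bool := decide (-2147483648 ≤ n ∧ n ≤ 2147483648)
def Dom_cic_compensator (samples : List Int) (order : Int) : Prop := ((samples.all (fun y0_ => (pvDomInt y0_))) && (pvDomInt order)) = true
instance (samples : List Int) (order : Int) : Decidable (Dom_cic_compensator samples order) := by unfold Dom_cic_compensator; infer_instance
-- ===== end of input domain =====

-- B recasts the filter as a superposition of zero-padded delayed streams added elementwise (zip),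
-- with the coefficient from a dict table; an alternative decomposition, not a speedup.

-- ===== PORT A =====
-- A's sequential `if` ladder selecting the coefficient, then a stateful loop appending d2 + x + A*d1.
def cic_compensator (samples : List Int) (order : Int) : List Int :=
  let A : Int :=
    if order = 1 then -18
    else if order = 2 ∨ order = 3 then -10
    else if order = 4 ∨ order = 5 then -6
    else -4
  (samples.foldl
    (fun (st : Int × Int × List Int) x =>
      (x, st.1, st.2.2 ++ [st.2.1 + x + A * st.1]))
    ((0 : Int), (0 : Int), ([] : List Int))).2.2

-- ===== PORT B =====
-- B: dict-table coefficient, then three streams (s, A*s delayed 1, s delayed 2) summed via zip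
-- (Python's 3-ary zip is ported as nested List.zip; it truncates to samples.length as zip does).
def cic_compensator_alt (samples : List Int) (order : Int) : List Int :=
  let A : Int :=
    PySem.Dict.getD (PySem.Dict.ofList [((1 : Int), (-18 : Int)), (2, -10), (3, -10), (4, -6), (5, -6)]) order (-4)
  let delayed1 : List Int := 0 :: samples.map (fun v => A * v)
  let delayed2 : List Int := 0 :: 0 :: samples
  (samples.zip (delayed1.zip delayed2)).map (fun t => t.1 + t.2.1 + t.2.2)

-- ===== PRECONDITION & SPEC =====
-- Pre_ excludes order < 1 with non-empty samples, where A raises UnboundLocalError (its ladder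
-- never assigns A; with empty samples the loop never reads A and A returns []).
def Pre_cic_compensator (samples : List Int) (order : Int) : Prop := samples = [] ∨ 1 ≤ order
instance (samples : List Int) (order : Int) : Decidable (Pre_cic_compensator samples order) := by unfold Pre_cic_compensator; infer_instance
def pvWitness_cic_compensator : List Int × Int := ([3, 1, 4, 1, 5], 2)

def Spec_cic_compensator (samples : List Int) (order : Int) (out : List Int) : Prop := out = cic_compensator_alt samples order
instance (samples : List Int) (order : Int) (out : List Int) : Decidable (Spec_cic_compensator samples order out) := by unfold Spec_cic_compensator; infer_instance

-- ===== CLAIM (what is proved, stated in full; the proofs are below) =====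
def Claim_equal_cic_compensator : Prop := ∀ (samples : List Int) (order : Int), Dom_cic_compensator samples order → Pre_cic_compensator samples order → Spec_cic_compensator samples order (cic_compensator samples order)

-- ===== LEMMAS AND PROOFS =====

-- A's loop as a structural recursion: pvG A s d1 d2 is the list A's loop appends, started from registers d1 d2.
def pvG (A : Int) : List Int → Int → Int → List Int
  | [], _, _ => []
  | x :: xs, d1, d2 => (d2 + x + A * d1) :: pvG A xs x d1

theorem foldl_eq_pvG (A : Int) :
    ∀ (s : List Int) (d1 d2 : Int) (acc : List Int),
      (s.foldl
        (fun (st : Int × Int × List Int) x =>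
          (x, st.1, st.2.2 ++ [st.2.1 + x + A * st.1]))
        (d1, d2, acc)).2.2 = acc ++ pvG A s d1 d2 := by
  intro s
  induction s with
  | nil => intro d1 d2 acc; simp [pvG]
  | cons x xs ih =>
      intro d1 d2 acc
      simp only [List.foldl_cons, pvG]
      rw [ih]
      simp

-- pvG started from registers d1 d2 is the zip-superposition with pads A*d1 and d2, d1.
theorem pvG_eq_zip (A : Int) :
    ∀ (s : List Int) (d1 d2 : Int),
      pvG A s d1 d2 =
        (s.zip ((A * d1 :: s.map (fun v => A * v)).zip (d2 :: d1 :: s))).map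
          (fun t => t.1 + t.2.1 + t.2.2) := by
  intro s
  induction s with
  | nil => intro d1 d2; simp [pvG]
  | cons x xs ih =>
      intro d1 d2
      rw [pvG, ih x d1]
      simp only [List.map_cons, List.zip_cons_cons, List.map]
      congr 1
      ring

theorem cic_compensator_spec : Claim_equal_cic_compensator := by
  intro samples order _ hPre
  rcases hPre with hnil | hPre
  · subst hnil; rfl
  unfold Spec_cic_compensator cic_compensator cic_compensator_alt
  have hA : (if order = 1 then (-18 : Int)
      else if order = 2 ∨ order = 3 then -10
      else if order = 4 ∨ order = 5 then -6
      else -4) =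
      PySem.Dict.getD (PySem.Dict.ofList [((1 : Int), (-18 : Int)), (2, -10), (3, -10), (4, -6), (5, -6)]) order (-4) := by
    have hd : PySem.Dict.ofList [((1 : Int), (-18 : Int)), (2, -10), (3, -10), (4, -6), (5, -6)]
        = PySem.Dict.mk [((1 : Int), (-18 : Int)), (2, -10), (3, -10), (4, -6), (5, -6)] := by decide
    have h1 : (1 : Int) ≤ order := hPre
    rw [hd]
    simp only [PySem.Dict.getD_eq_get?_getD, PySem.Dict.get?_mk_cons, beq_iff_eq]
    split_ifs <;> first | rfl | omega
  rw [hA]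
  set A : Int := PySem.Dict.getD (PySem.Dict.ofList [((1 : Int), (-18 : Int)), (2, -10), (3, -10), (4, -6), (5, -6)]) order (-4) with hAdef
  rw [foldl_eq_pvG A samples 0 0 [], List.nil_append, pvG_eq_zip]
  simp
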